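-- pv_equiv track=rewrite | github.com/DataBrewery/cubes | cubes/util.py | combine_node_levels
-- ===== SOURCE A (Python) =====
-- import itertools
--
-- def node_level_points(node):
--     """Get all level points within given node. Node is described as tuple:
--     (object, levels) where levels is a list or a tuple"""
--
--     levels = []
--     points = []
--     for level in node[1]:
--         levels.append(level)
--         points.append( (node, tuple(levels)))
--
--     return points
--
-- def combine_node_levels(nodes):
--     """Get all possible combinations between each level from each node. It is
--     a cartesian product of first node levels and all combinations of the rest
--     of the levels"""
--
--     if not nodes:
--         raise Exception("List of nodes is empty")
--     if len(nodes) == 1: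
--         current_node = nodes[0]
--         points = node_level_points(current_node)
--
--         # Combos is a list of one-item lists:
--         # combo = (item) => ( ( (name, (level,...)), (plevel, ...)) )
--         # item = (node, plevels) => ( (name, (level,...)), (plevel, ...))
--         # node = (name, levels) => (name, (level,...))
--         # levels = (level)
--
--         combos = []
--         for point in points:
--             combos.append( (point, ) )
--
--         return combos
--     else:
--         current_node = nodes[0]
--         current_name = current_node[0]
--         other_nodes = nodes[1:]
--
--         current_points = node_level_points(current_node) # LIST OF POINTS
--         other_points = combine_node_levels(other_nodes) # LIST OF POINTS ???
--
--
--         combos = []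
--
--         for combo in itertools.product(current_points, other_points):
--             res = (combo[0], ) + combo[1]
--             combos.append(res)
--
--         return list(combos)
-- ===== SOURCE B (Python) =====
-- import itertools
--
-- def node_level_points(node):
--     # point i = (node, prefix of length i+1 of node's levels)
--     levels = node[1]
--     return [(node, tuple(levels[:i + 1])) for i in range(len(levels))]
--
-- def combine_node_levels(nodes):
--     if not nodes:
--         raise Exception("List of nodes is empty")
--     point_lists = [node_level_points(n) for n in nodes]
--     return [tuple(combo) for combo in itertools.product(*point_lists)]
-- ===== Notes on version B (the rewrite author's own statement) =====
-- stated objective: simpler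
-- what changed: Replaces the recursion over nodes[1:] with pairwise tuple concatenation by one flat n-ary itertools.product over per-node point lists, and builds each node's points as prefix slices instead of an accumulating loop.
import Mathlib
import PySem

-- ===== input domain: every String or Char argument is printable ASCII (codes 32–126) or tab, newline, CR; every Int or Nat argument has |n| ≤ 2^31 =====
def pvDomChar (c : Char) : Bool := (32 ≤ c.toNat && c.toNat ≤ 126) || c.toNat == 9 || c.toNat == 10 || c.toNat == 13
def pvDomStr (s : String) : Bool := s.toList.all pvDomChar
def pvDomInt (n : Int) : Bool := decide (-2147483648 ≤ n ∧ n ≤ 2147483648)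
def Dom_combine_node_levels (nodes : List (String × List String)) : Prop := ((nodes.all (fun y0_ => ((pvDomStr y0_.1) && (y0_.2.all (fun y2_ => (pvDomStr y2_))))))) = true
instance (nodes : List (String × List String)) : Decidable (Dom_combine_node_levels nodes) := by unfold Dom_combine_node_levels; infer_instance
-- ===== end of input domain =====

-- B replaces A's pairwise recursion over nodes[1:] by one flat n-ary Cartesian product
-- over per-node point lists (objective: simpler); return-value equivalence on nonempty input.

-- ===== PORT A =====
-- node_level_points: accumulating loop over node[1] building levels and points
def pvNlpA (node : String × List String) : List ((String × List String) × List String) :=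
  (node.2.foldl
    (fun (st : List String × List ((String × List String) × List String)) level =>
      (st.1 ++ [level], st.2 ++ [(node, st.1 ++ [level])]))
    ([], [])).2

def combine_node_levels (nodes : List (String × List String)) : List (List ((String × List String) × List String)) :=
  match nodes with
  | [] => []   -- Python raises Exception("List of nodes is empty"); excluded by Pre_
  | [current_node] =>
      let points := pvNlpA current_node
      points.foldl (fun combos point => combos ++ [[point]]) []
  | current_node :: other_nodes =>
      let current_points := pvNlpA current_node
      let other_points := combine_node_levels other_nodes
      -- for combo in itertools.product(current_points, other_points): (combo[0],)+combo[1]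
      current_points.flatMap (fun a => other_points.map (fun b => a :: b))

-- ===== PORT B =====
-- node_level_points via prefix slices over range(len(levels))
def pvNlpB (node : String × List String) : List ((String × List String) × List String) :=
  (List.range node.2.length).map (fun i => (node, node.2.take (i + 1)))

-- n-ary itertools.product over a list of point lists
def pvProdN : List (List ((String × List String) × List String)) → List (List ((String × List String) × List String))
  | [] => [[]]
  | l :: ls => l.flatMap (fun a => (pvProdN ls).map (fun rest => a :: rest))

def combine_node_levels_alt (nodes : List (String × List String)) : List (List ((String × List String) × List String)) :=
  if nodes = [] then []   -- Python raises Exception("List of nodes is empty"); excluded by Pre_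
  else pvProdN (nodes.map pvNlpB)

-- ===== PRECONDITION & SPEC =====
-- Pre_ excludes only the empty node list, on which Python A (and B) raise Exception.
def Pre_combine_node_levels (nodes : List (String × List String)) : Prop := nodes ≠ []
instance (nodes : List (String × List String)) : Decidable (Pre_combine_node_levels nodes) := by unfold Pre_combine_node_levels; infer_instance
def pvWitness_combine_node_levels : (List (String × List String)) := [("a", ["x", "y"]), ("b", ["u"])]

def Spec_combine_node_levels (nodes : List (String × List String)) (out : List (List ((String × List String) × List String))) : Prop := out = combine_node_levels_alt nodes
instance (nodes : List (String × List String)) (out : List (List ((String × List String) × List String))) : Decidable (Spec_combine_node_levels nodes out) := by unfold Spec_combine_node_levels; infer_instance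

-- ===== CLAIM (what is proved, stated in full; the proofs are below) =====
def Claim_equal_combine_node_levels : Prop := ∀ (nodes : List (String × List String)), Dom_combine_node_levels nodes → Pre_combine_node_levels nodes → Spec_combine_node_levels nodes (combine_node_levels nodes)

-- ===== LEMMAS AND PROOFS =====

-- A's accumulating loop produces exactly the prefix slices B computes.
theorem pvNlpA_aux (node : String × List String) :
    ∀ (ls levels : List String) (pts : List ((String × List String) × List String)),
      (ls.foldl
        (fun (st : List String × List ((String × List String) × List String)) level =>
          (st.1 ++ [level], st.2 ++ [(node, st.1 ++ [level])]))
        (levels, pts)).2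
      = pts ++ (List.range ls.length).map (fun i => (node, levels ++ ls.take (i + 1))) := by
  intro ls
  induction ls with
  | nil => intro levels pts; simp
  | cons a ls ih =>
      intro levels pts
      simp only [List.foldl_cons, ih (levels ++ [a]) (pts ++ [(node, levels ++ [a])]),
        List.length_cons, List.range_succ_eq_map, List.map_cons, List.map_map]
      simp [List.append_assoc, Function.comp]

theorem pvNlp_eq (node : String × List String) : pvNlpA node = pvNlpB node := by
  unfold pvNlpA pvNlpB
  rw [pvNlpA_aux node node.2 [] []]
  simp

theorem combine_eq_prodN : ∀ (nodes : List (String × List String)), nodes ≠ [] →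
    combine_node_levels nodes = pvProdN (nodes.map pvNlpB) := by
  intro nodes
  induction nodes with
  | nil => intro h; exact absurd rfl h
  | cons n rest ih =>
      intro _
      cases rest with
      | nil =>
          simp only [combine_node_levels, List.map_cons, List.map_nil, pvProdN, pvNlp_eq]
          have h : ∀ (l : List ((String × List String) × List String))
              (acc : List (List ((String × List String) × List String))),
              l.foldl (fun combos point => combos ++ [[point]]) acc
                = acc ++ l.map (fun p => [p]) := by
            intro l
            induction l with
            | nil => simp
            | cons x xs ihx => intro acc; simp [ihx]
          have h2 : ∀ (l : List ((String × List String) × List String)),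
              (List.map (fun a => [[a]]) l).flatten = List.map (fun p => [p]) l := by
            intro l
            induction l with
            | nil => rfl
            | cons x xs ihx => simp [ihx]
          simp [h (pvNlpB n) [], List.flatMap, h2]
      | cons m rest' =>
          simp only [combine_node_levels]
          rw [ih (by simp)]
          simp only [List.map_cons, pvProdN, pvNlp_eq]

-- ===== VERDICT (by name: the statement is the Claim_ definition above) =====
theorem combine_node_levels_spec : Claim_equal_combine_node_levels := by
  intro nodes _ hpre
  unfold Spec_combine_node_levels combine_node_levels_alt
  rw [if_neg hpre, combine_eq_prodN nodes hpre]
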